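-- pv_equiv track=rewrite | github.com/yangjing6688/framework | ExtremeAutomation/Apis/NetworkElement/GeneratedApis/ParseApis/CLI/filemanagement/ALPHA/base/baseversion/baseunit/FilemanagementCustomShowTools.py | check_config_file_exists
-- ===== SOURCE A (Python) =====
-- def check_config_file_exists(output, args, **kwargs):
--     formats = [".cfg", ".config"]
--
--     config_files = []
--     for filename in output.split():
--         for ending in formats:
--             if ending in filename:
--                 config_files.append(filename)
--
--     for config_file in config_files:
--         if args["config"] in config_file:
--             return True, True
--     return False, False
-- ===== SOURCE B (Python) =====
-- def check_config_file_exists(output, args, **kwargs):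
--     for filename in output.split():
--         if ".cfg" in filename or ".config" in filename:
--             if args["config"] in filename:
--                 return True, True
--     return False, False
-- ===== Notes on version B (the rewrite author's own statement) =====
-- stated objective: simpler
-- what changed: Replaced A's two-pass structure (build an intermediate config_files list, then rescan it for the config name) with a single fused loop over output.split() that early-returns on the first filename matching both a format ending and the config name; the intermediate list disappears.
import Mathlib
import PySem

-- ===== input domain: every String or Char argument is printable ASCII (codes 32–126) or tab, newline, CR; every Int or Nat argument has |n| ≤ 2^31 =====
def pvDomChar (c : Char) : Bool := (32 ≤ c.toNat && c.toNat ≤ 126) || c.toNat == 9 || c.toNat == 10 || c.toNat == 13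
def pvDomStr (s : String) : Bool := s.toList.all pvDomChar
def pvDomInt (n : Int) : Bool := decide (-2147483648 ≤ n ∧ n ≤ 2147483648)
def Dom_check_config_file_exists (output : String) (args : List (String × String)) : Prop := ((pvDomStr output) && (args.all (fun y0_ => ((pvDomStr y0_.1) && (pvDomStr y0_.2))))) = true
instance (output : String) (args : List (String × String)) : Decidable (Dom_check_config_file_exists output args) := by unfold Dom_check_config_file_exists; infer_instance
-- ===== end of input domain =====

-- B fuses A's two passes (build config_files, then rescan) into one early-exit loop; objective: simpler.
-- ===== PORT A =====
-- args["config"]; faithful under Pre_ (key present whenever it is looked up)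
def cfgValA (args : List (String × String)) : String :=
  ((PySem.Dict.ofList args).get? "config").getD ""

-- 'for config_file in config_files: if args["config"] in config_file: return True, True'
def scanA (cfg : String) : List String → Bool × Bool
  | [] => (false, false)
  | cf :: rest => if PySem.Str.isIn cfg cf then (true, true) else scanA cfg rest

def check_config_file_exists (output : String) (args : List (String × String)) : Bool × Bool :=
  let formats := [".cfg", ".config"]
  let config_files :=
    (PySem.Str.split₀ output).foldl (fun acc filename =>
      formats.foldl (fun acc ending =>
        if PySem.Str.isIn ending filename then acc ++ [filename] else acc) acc) []
  scanA (cfgValA args) config_files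

-- ===== PORT B =====
-- args["config"] as Source B reads it; faithful under Pre_ (key present whenever it is looked up)
def cfgValB (args : List (String × String)) : String :=
  ((PySem.Dict.ofList args).get? "config").getD ""

-- single fused loop with early exit (Source B)
def scanB (cfg : String) : List String → Bool × Bool
  | [] => (false, false)
  | w :: ws =>
    if (PySem.Str.isIn ".cfg" w || PySem.Str.isIn ".config" w) && PySem.Str.isIn cfg w
    then (true, true) else scanB cfg ws

def check_config_file_exists_alt (output : String) (args : List (String × String)) : Bool × Bool :=
  scanB (cfgValB args) (PySem.Str.split₀ output)

-- ===== PRECONDITION & SPEC =====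
-- Pre_ excludes exactly the inputs on which Python A raises KeyError: a filename in
-- output.split() contains ".cfg"/".config" while args has no "config" key (B raises there too).
def Pre_check_config_file_exists (output : String) (args : List (String × String)) : Prop :=
  (args.any (fun p => p.1 == "config")
   || (PySem.Str.split₀ output).all
        (fun w => !(PySem.Str.isIn ".cfg" w || PySem.Str.isIn ".config" w))) = true
instance (output : String) (args : List (String × String)) : Decidable (Pre_check_config_file_exists output args) := by unfold Pre_check_config_file_exists; infer_instance

def pvWitness_check_config_file_exists : String × (List (String × String)) :=
  ("run a.cfg done", [("config", "a")])

def Spec_check_config_file_exists (output : String) (args : List (String × String)) (out : Bool × Bool) : Prop := out = check_config_file_exists_alt output args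
instance (output : String) (args : List (String × String)) (out : Bool × Bool) : Decidable (Spec_check_config_file_exists output args out) := by unfold Spec_check_config_file_exists; infer_instance

-- ===== CLAIM (what is proved, stated in full; the proofs are below) =====
def Claim_equal_check_config_file_exists : Prop := ∀ (output : String) (args : List (String × String)), Dom_check_config_file_exists output args → Pre_check_config_file_exists output args → Spec_check_config_file_exists output args (check_config_file_exists output args)

-- ===== LEMMAS AND PROOFS =====
-- which filenames the inner 'for ending in formats' loop appends for one filename
def chunkA (f : String) : List String :=
  (if PySem.Str.isIn ".cfg" f then [f] else []) ++ (if PySem.Str.isIn ".config" f then [f] else [])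

theorem inner_foldl_eq_chunk (acc : List String) (f : String) :
    [".cfg", ".config"].foldl (fun acc ending =>
      if PySem.Str.isIn ending f then acc ++ [f] else acc) acc = acc ++ chunkA f := by
  simp [List.foldl, chunkA]; split_ifs <;> simp

theorem build_eq_flatMap (ws : List String) (acc : List String) :
    ws.foldl (fun acc filename =>
      [".cfg", ".config"].foldl (fun acc ending =>
        if PySem.Str.isIn ending filename then acc ++ [filename] else acc) acc) acc
    = acc ++ ws.flatMap chunkA := by
  induction ws generalizing acc with
  | nil => simp
  | cons w ws ih => rw [List.foldl_cons, inner_foldl_eq_chunk, ih]; simp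

theorem scanA_eq_any (cfg : String) (xs : List String) :
    scanA cfg xs = if xs.any (fun cf => PySem.Str.isIn cfg cf) then (true, true) else (false, false) := by
  induction xs with
  | nil => simp [scanA]
  | cons x xs ih =>
    rw [scanA, ih, List.any_cons]
    cases hx : PySem.Str.isIn cfg x <;>
      cases ha : xs.any (fun cf => PySem.Str.isIn cfg cf) <;> simp_all

theorem scanB_eq_any (cfg : String) (ws : List String) :
    scanB cfg ws = if ws.any (fun w =>
        (PySem.Str.isIn ".cfg" w || PySem.Str.isIn ".config" w) && PySem.Str.isIn cfg w)
      then (true, true) else (false, false) := by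
  induction ws with
  | nil => simp [scanB]
  | cons w ws ih =>
    rw [scanB, ih, List.any_cons]
    cases hw : ((PySem.Str.isIn ".cfg" w || PySem.Str.isIn ".config" w) && PySem.Str.isIn cfg w) <;>
      cases ha : ws.any (fun w => (PySem.Str.isIn ".cfg" w || PySem.Str.isIn ".config" w) && PySem.Str.isIn cfg w) <;>
        simp_all

theorem chunk_any (cfg f : String) :
    (chunkA f).any (fun cf => PySem.Str.isIn cfg cf)
    = ((PySem.Str.isIn ".cfg" f || PySem.Str.isIn ".config" f) && PySem.Str.isIn cfg f) := by
  simp [chunkA]; split_ifs <;> simp_all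

theorem cfgB_eq_cfgA (args : List (String × String)) : cfgValB args = cfgValA args := rfl

-- ===== VERDICT (by name: the statement is the Claim_ definition above) =====
theorem check_config_file_exists_spec : Claim_equal_check_config_file_exists := by
  intro output args _ _
  unfold Spec_check_config_file_exists check_config_file_exists_alt
  simp only [check_config_file_exists]
  rw [build_eq_flatMap, scanA_eq_any, scanB_eq_any]
  show _ = if _ then _ else _
  rw [cfgB_eq_cfgA]
  simp only [List.nil_append, List.any_flatMap, chunk_any]
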